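-- pv_equiv track=rewrite | github.com/titechprabhasolutions/Brahma-AI | actions/app_intelligence.py | suggestions_for
-- ===== SOURCE A (Python) =====
-- def suggestions_for(app_name: str = "", last_text: str = "", conversation_mode: bool = False) -> list[str]:
--     app = (app_name or "").lower()
--     text = (last_text or "").lower()
--     suggestions = []
--
--     if "code" in app or "visual studio" in app or "vscode" in app:
--         suggestions.extend(["Run your project", "Open terminal here", "Explain current error"])
--     elif "chrome" in app or "browser" in app or "edge" in app:
--         suggestions.extend(["Search something", "Summarize this page", "Analyze what's on screen"])
--     elif "notion" in app:
--         suggestions.extend(["Open study mode", "Create notes template", "Start focus session"])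
--     elif "capcut" in app or "premiere" in app or "editing" in app:
--         suggestions.extend(["Open last project", "Start creator mode", "Mute notifications"])
--
--     if "system health" in text or "cpu" in text:
--         suggestions.extend(["Show top processes", "Organize downloads", "Open task manager"])
--
--     if "workflow" in text:
--         suggestions.extend(["List workflows", "Run study mode", "Create work mode"])
--
--     if conversation_mode and not suggestions:
--         suggestions.extend(["What should I do next?", "Show clipboard history", "Check system health"])
--
--     deduped = []
--     seen = set()
--     for item in suggestions:
--         key = item.lower()
--         if key not in seen:
--             deduped.append(item)
--             seen.add(key)
--     return deduped[:4]
-- ===== SOURCE B (Python) =====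
-- _VSCODE = ["Run your project", "Open terminal here", "Explain current error"]
-- _BROWSER = ["Search something", "Summarize this page", "Analyze what's on screen"]
-- _NOTION = ["Open study mode", "Create notes template", "Start focus session"]
-- _EDITOR = ["Open last project", "Start creator mode", "Mute notifications"]
--
-- _APP_KEYWORDS = [
--     ("code", _VSCODE), ("visual studio", _VSCODE), ("vscode", _VSCODE),
--     ("chrome", _BROWSER), ("browser", _BROWSER), ("edge", _BROWSER),
--     ("notion", _NOTION),
--     ("capcut", _EDITOR), ("premiere", _EDITOR), ("editing", _EDITOR),
-- ]
--
--
-- def suggestions_for(app_name: str = "", last_text: str = "", conversation_mode: bool = False) -> list[str]: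
--     app = (app_name or "").lower()
--     text = (last_text or "").lower()
--
--     # All suggestion strings are pairwise distinct even case-insensitively, so
--     # no dedup pass is needed; the final [:4] cap is pushed into the
--     # concatenation, so at most 4 items are ever built.
--     out = next((menu for kw, menu in _APP_KEYWORDS if kw in app), [])[:4]
--     if len(out) < 4 and ("system health" in text or "cpu" in text):
--         out = out + ["Show top processes", "Organize downloads", "Open task manager"][:4 - len(out)]
--     if len(out) < 4 and "workflow" in text:
--         out = out + ["List workflows", "Run study mode", "Create work mode"][:4 - len(out)]
--     if conversation_mode and not out:
--         out = ["What should I do next?", "Show clipboard history", "Check system health"]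
--     return out
-- ===== Notes on version B (the rewrite author's own statement) =====
-- stated objective: alternative
-- what changed: B drops A's dedup pass and final [:4] slice entirely: since every suggestion string is pairwise case-insensitively distinct, dedup is the identity, so B builds at most 4 items directly - a single first-match scan over a flat keyword list picks the app menu, and each text menu is appended pre-truncated to the remaining capacity (4 - len(out)).
import Mathlib
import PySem

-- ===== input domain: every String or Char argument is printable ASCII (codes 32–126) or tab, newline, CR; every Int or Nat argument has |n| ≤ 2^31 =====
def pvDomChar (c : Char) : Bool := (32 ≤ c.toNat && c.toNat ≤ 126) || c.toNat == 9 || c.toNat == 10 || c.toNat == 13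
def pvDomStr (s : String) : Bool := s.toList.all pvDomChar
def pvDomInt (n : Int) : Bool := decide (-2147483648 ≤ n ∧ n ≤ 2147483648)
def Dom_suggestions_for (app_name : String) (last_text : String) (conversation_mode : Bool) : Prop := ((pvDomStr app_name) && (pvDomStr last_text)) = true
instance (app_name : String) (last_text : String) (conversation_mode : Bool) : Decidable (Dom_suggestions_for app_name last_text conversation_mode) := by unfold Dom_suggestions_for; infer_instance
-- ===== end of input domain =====

-- B removes A's dedup pass and final slice (all suggestion strings are case-insensitively
-- distinct, so dedup is the identity) and builds at most 4 items directly, capping while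
-- concatenating; a genuinely different construction of the same value (objective: alternative).

-- ===== PORT A =====
def suggestions_for (app_name : String) (last_text : String) (conversation_mode : Bool) : List String :=
  let app := PySem.Str.lower app_name
  let text := PySem.Str.lower last_text
  let suggestions : List String := []
  let suggestions :=
    if PySem.Str.isIn "code" app || (PySem.Str.isIn "visual studio" app || PySem.Str.isIn "vscode" app) then
      suggestions ++ ["Run your project", "Open terminal here", "Explain current error"]
    else if PySem.Str.isIn "chrome" app || (PySem.Str.isIn "browser" app || PySem.Str.isIn "edge" app) then
      suggestions ++ ["Search something", "Summarize this page", "Analyze what's on screen"]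
    else if PySem.Str.isIn "notion" app then
      suggestions ++ ["Open study mode", "Create notes template", "Start focus session"]
    else if PySem.Str.isIn "capcut" app || (PySem.Str.isIn "premiere" app || PySem.Str.isIn "editing" app) then
      suggestions ++ ["Open last project", "Start creator mode", "Mute notifications"]
    else suggestions
  let suggestions :=
    if PySem.Str.isIn "system health" text || PySem.Str.isIn "cpu" text then
      suggestions ++ ["Show top processes", "Organize downloads", "Open task manager"]
    else suggestions
  let suggestions :=
    if PySem.Str.isIn "workflow" text then
      suggestions ++ ["List workflows", "Run study mode", "Create work mode"]
    else suggestions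
  let suggestions :=
    if conversation_mode && suggestions.isEmpty then
      suggestions ++ ["What should I do next?", "Show clipboard history", "Check system health"]
    else suggestions
  let dedupState := suggestions.foldl
    (fun (acc : List String × PySem.Set String) item =>
      let key := PySem.Str.lower item
      if PySem.Set.contains acc.2 key then acc
      else (acc.1 ++ [item], PySem.Set.add acc.2 key))
    ([], PySem.Set.empty)
  PySem.List.slice dedupState.1 none (some 4)

-- ===== PORT B =====
def pvVscode : List String := ["Run your project", "Open terminal here", "Explain current error"]
def pvBrowser : List String := ["Search something", "Summarize this page", "Analyze what's on screen"]
def pvNotion : List String := ["Open study mode", "Create notes template", "Start focus session"]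
def pvEditor : List String := ["Open last project", "Start creator mode", "Mute notifications"]

def pvAppKeywords : List (String × List String) :=
  [("code", pvVscode), ("visual studio", pvVscode), ("vscode", pvVscode),
   ("chrome", pvBrowser), ("browser", pvBrowser), ("edge", pvBrowser),
   ("notion", pvNotion),
   ("capcut", pvEditor), ("premiere", pvEditor), ("editing", pvEditor)]

-- first match of the generator 'next((menu for kw, menu in _APP_KEYWORDS if kw in app), [])'
def pvFirstMatch (app : String) : List (String × List String) → List String
  | [] => []
  | kv :: rest => if PySem.Str.isIn kv.1 app then kv.2 else pvFirstMatch app rest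

def suggestions_for_alt (app_name : String) (last_text : String) (conversation_mode : Bool) : List String :=
  let app := PySem.Str.lower app_name
  let text := PySem.Str.lower last_text
  -- next((menu for kw, menu in _APP_KEYWORDS if kw in app), [])[:4]
  let out := PySem.List.slice (pvFirstMatch app pvAppKeywords) none (some 4)
  let out :=
    if decide (out.length < 4) && (PySem.Str.isIn "system health" text || PySem.Str.isIn "cpu" text) then
      out ++ PySem.List.slice ["Show top processes", "Organize downloads", "Open task manager"] none (some (4 - (out.length : Int)))
    else out
  let out :=
    if decide (out.length < 4) && PySem.Str.isIn "workflow" text then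
      out ++ PySem.List.slice ["List workflows", "Run study mode", "Create work mode"] none (some (4 - (out.length : Int)))
    else out
  if conversation_mode && out.isEmpty then
    ["What should I do next?", "Show clipboard history", "Check system health"]
  else out

-- ===== PRECONDITION & SPEC =====
def Spec_suggestions_for (app_name : String) (last_text : String) (conversation_mode : Bool) (out : List String) : Prop := out = suggestions_for_alt app_name last_text conversation_mode
instance (app_name : String) (last_text : String) (conversation_mode : Bool) (out : List String) : Decidable (Spec_suggestions_for app_name last_text conversation_mode out) := by unfold Spec_suggestions_for; infer_instance

-- ===== CLAIM (what is proved, stated in full; the proofs are below) =====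
def Claim_equal_suggestions_for : Prop := ∀ (app_name : String) (last_text : String) (conversation_mode : Bool), Dom_suggestions_for app_name last_text conversation_mode → Spec_suggestions_for app_name last_text conversation_mode (suggestions_for app_name last_text conversation_mode)

-- ===== LEMMAS AND PROOFS =====
-- B's flat first-match keyword scan equals the grouped elif choice.
lemma pvFindBlock (app : String) :
    pvFirstMatch app pvAppKeywords =
    (if PySem.Str.isIn "code" app || (PySem.Str.isIn "visual studio" app || PySem.Str.isIn "vscode" app) then pvVscode
     else if PySem.Str.isIn "chrome" app || (PySem.Str.isIn "browser" app || PySem.Str.isIn "edge" app) then pvBrowser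
     else if PySem.Str.isIn "notion" app then pvNotion
     else if PySem.Str.isIn "capcut" app || (PySem.Str.isIn "premiere" app || PySem.Str.isIn "editing" app) then pvEditor
     else []) := by
  simp only [pvAppKeywords, pvFirstMatch]
  cases h1 : PySem.Str.isIn "code" app
  · cases h2 : PySem.Str.isIn "visual studio" app
    · cases h3 : PySem.Str.isIn "vscode" app
      · cases h4 : PySem.Str.isIn "chrome" app
        · cases h5 : PySem.Str.isIn "browser" app
          · cases h6 : PySem.Str.isIn "edge" app
            · cases h7 : PySem.Str.isIn "notion" app
              · cases h8 : PySem.Str.isIn "capcut" app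
                · cases h9 : PySem.Str.isIn "premiere" app
                  · cases h10 : PySem.Str.isIn "editing" app
                    · rfl
                    · rfl
                  · rfl
                · rfl
              · rfl
            · rfl
          · rfl
        · rfl
      · rfl
    · rfl
  · rfl

-- ===== VERDICT (by name: the statement is the Claim_ definition above) =====
-- A's body as a function of its seven boolean tests (same computation, conditions abstracted)
def pvTableA (b1 b2 b3 b4 t1 t2 c : Bool) : List String :=
  let suggestions : List String := []
  let suggestions :=
    if b1 then suggestions ++ ["Run your project", "Open terminal here", "Explain current error"]
    else if b2 then suggestions ++ ["Search something", "Summarize this page", "Analyze what's on screen"]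
    else if b3 then suggestions ++ ["Open study mode", "Create notes template", "Start focus session"]
    else if b4 then suggestions ++ ["Open last project", "Start creator mode", "Mute notifications"]
    else suggestions
  let suggestions :=
    if t1 then suggestions ++ ["Show top processes", "Organize downloads", "Open task manager"] else suggestions
  let suggestions :=
    if t2 then suggestions ++ ["List workflows", "Run study mode", "Create work mode"] else suggestions
  let suggestions :=
    if c && suggestions.isEmpty then
      suggestions ++ ["What should I do next?", "Show clipboard history", "Check system health"]
    else suggestions
  let dedupState := suggestions.foldl
    (fun (acc : List String × PySem.Set String) item =>
      let key := PySem.Str.lower item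
      if PySem.Set.contains acc.2 key then acc
      else (acc.1 ++ [item], PySem.Set.add acc.2 key))
    ([], PySem.Set.empty)
  PySem.List.slice dedupState.1 none (some 4)

-- B's body as a function of the same seven tests (the app block via the if-chain of pvFindBlock)
def pvTableB (b1 b2 b3 b4 t1 t2 c : Bool) : List String :=
  let out := PySem.List.slice
    (if b1 then pvVscode else if b2 then pvBrowser else if b3 then pvNotion else if b4 then pvEditor else [])
    none (some 4)
  let out :=
    if decide (out.length < 4) && t1 then
      out ++ PySem.List.slice ["Show top processes", "Organize downloads", "Open task manager"] none (some (4 - (out.length : Int)))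
    else out
  let out :=
    if decide (out.length < 4) && t2 then
      out ++ PySem.List.slice ["List workflows", "Run study mode", "Create work mode"] none (some (4 - (out.length : Int)))
    else out
  if c && out.isEmpty then
    ["What should I do next?", "Show clipboard history", "Check system health"]
  else out

lemma pvA_eq (app_name last_text : String) (conversation_mode : Bool) :
    suggestions_for app_name last_text conversation_mode =
    pvTableA
      (PySem.Str.isIn "code" (PySem.Str.lower app_name) || (PySem.Str.isIn "visual studio" (PySem.Str.lower app_name) || PySem.Str.isIn "vscode" (PySem.Str.lower app_name)))
      (PySem.Str.isIn "chrome" (PySem.Str.lower app_name) || (PySem.Str.isIn "browser" (PySem.Str.lower app_name) || PySem.Str.isIn "edge" (PySem.Str.lower app_name)))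
      (PySem.Str.isIn "notion" (PySem.Str.lower app_name))
      (PySem.Str.isIn "capcut" (PySem.Str.lower app_name) || (PySem.Str.isIn "premiere" (PySem.Str.lower app_name) || PySem.Str.isIn "editing" (PySem.Str.lower app_name)))
      (PySem.Str.isIn "system health" (PySem.Str.lower last_text) || PySem.Str.isIn "cpu" (PySem.Str.lower last_text))
      (PySem.Str.isIn "workflow" (PySem.Str.lower last_text))
      conversation_mode := rfl

lemma pvB_eq (app_name last_text : String) (conversation_mode : Bool) :
    suggestions_for_alt app_name last_text conversation_mode =
    pvTableB
      (PySem.Str.isIn "code" (PySem.Str.lower app_name) || (PySem.Str.isIn "visual studio" (PySem.Str.lower app_name) || PySem.Str.isIn "vscode" (PySem.Str.lower app_name)))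
      (PySem.Str.isIn "chrome" (PySem.Str.lower app_name) || (PySem.Str.isIn "browser" (PySem.Str.lower app_name) || PySem.Str.isIn "edge" (PySem.Str.lower app_name)))
      (PySem.Str.isIn "notion" (PySem.Str.lower app_name))
      (PySem.Str.isIn "capcut" (PySem.Str.lower app_name) || (PySem.Str.isIn "premiere" (PySem.Str.lower app_name) || PySem.Str.isIn "editing" (PySem.Str.lower app_name)))
      (PySem.Str.isIn "system health" (PySem.Str.lower last_text) || PySem.Str.isIn "cpu" (PySem.Str.lower last_text))
      (PySem.Str.isIn "workflow" (PySem.Str.lower last_text))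
      conversation_mode := by
  unfold suggestions_for_alt pvTableB
  simp only [pvFindBlock]

lemma pvTable_eq : ∀ b1 b2 b3 b4 t1 t2 c : Bool, pvTableA b1 b2 b3 b4 t1 t2 c = pvTableB b1 b2 b3 b4 t1 t2 c := by
  decide

-- ===== VERDICT (by name: the statement is the Claim_ definition above) =====
theorem suggestions_for_spec : Claim_equal_suggestions_for := by
  intro app_name last_text conversation_mode _
  unfold Spec_suggestions_for
  rw [pvA_eq, pvB_eq, pvTable_eq]
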